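-- pv_equiv track=rewrite | github.com/yigithanyigit/kernel-mcp | src/nvidia_docs_mcp/scraper.py | _chunk_large_sections
-- ===== SOURCE A (Python) =====
-- def _chunk_large_sections(sections: list[dict], max_chars: int = 8000) -> list[dict]:
--     """Split sections that are too large into smaller chunks."""
--     result = []
--     for section in sections:
--         content = section["content"]
--         if len(content) <= max_chars:
--             result.append(section)
--             continue
--
--         # Split by double newlines (paragraph boundaries)
--         paragraphs = content.split("\n\n")
--         chunk_parts = []
--         chunk_len = 0
--         chunk_idx = 0
--
--         for para in paragraphs:
--             if chunk_len + len(para) > max_chars and chunk_parts: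
--                 result.append({
--                     **section,
--                     "heading": f"{section['heading']} (part {chunk_idx + 1})",
--                     "content": "\n\n".join(chunk_parts),
--                 })
--                 chunk_parts = []
--                 chunk_len = 0
--                 chunk_idx += 1
--             chunk_parts.append(para)
--             chunk_len += len(para)
--
--         if chunk_parts:
--             suffix = f" (part {chunk_idx + 1})" if chunk_idx > 0 else ""
--             result.append({
--                 **section,
--                 "heading": f"{section['heading']}{suffix}",
--                 "content": "\n\n".join(chunk_parts),
--             })
--     return result
-- ===== SOURCE B (Python) =====
-- def _chunk_large_sections(sections: list[dict], max_chars: int = 8000) -> list[dict]: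
--     """Split oversized sections at paragraph boundaries, locating each cut by
--     binary search on a prefix-sum array of paragraph lengths."""
--     result = []
--     for section in sections:
--         content = section["content"]
--         if len(content) <= max_chars:
--             result.append(section)
--             continue
--         paras = content.split("\n\n")
--         n = len(paras)
--         prefix = [0]
--         for p in paras:
--             prefix.append(prefix[-1] + len(p))
--         # each chunk [i, e) is the maximal run with prefix[e] - prefix[i] <= max_chars
--         # (at least one paragraph); e is found by binary search on the monotone prefix array
--         cuts = [0]
--         while cuts[-1] < n:
--             i = cuts[-1]
--             limit = prefix[i] + max_chars
--             lo, hi = i + 1, n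
--             while lo < hi:
--                 mid = (lo + hi + 1) // 2
--                 if prefix[mid] <= limit:
--                     lo = mid
--                 else:
--                     hi = mid - 1
--             cuts.append(lo)
--         many = len(cuts) > 2
--         for k, (a, b) in enumerate(zip(cuts, cuts[1:])):
--             suffix = f" (part {k + 1})" if many else ""
--             result.append({**section,
--                            "heading": section["heading"] + suffix,
--                            "content": "\n\n".join(paras[a:b])})
--     return result
-- ===== Notes on version B (the rewrite author's own statement) =====
-- stated objective: alternative
-- what changed: A packs paragraphs one by one with a running accumulator that flushes chunks inline; B instead builds a prefix-sum array of paragraph lengths, locates every chunk boundary by binary search for the furthest index whose prefix sum fits within max_chars, and then formats the slices between consecutive cuts.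
import Mathlib
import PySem

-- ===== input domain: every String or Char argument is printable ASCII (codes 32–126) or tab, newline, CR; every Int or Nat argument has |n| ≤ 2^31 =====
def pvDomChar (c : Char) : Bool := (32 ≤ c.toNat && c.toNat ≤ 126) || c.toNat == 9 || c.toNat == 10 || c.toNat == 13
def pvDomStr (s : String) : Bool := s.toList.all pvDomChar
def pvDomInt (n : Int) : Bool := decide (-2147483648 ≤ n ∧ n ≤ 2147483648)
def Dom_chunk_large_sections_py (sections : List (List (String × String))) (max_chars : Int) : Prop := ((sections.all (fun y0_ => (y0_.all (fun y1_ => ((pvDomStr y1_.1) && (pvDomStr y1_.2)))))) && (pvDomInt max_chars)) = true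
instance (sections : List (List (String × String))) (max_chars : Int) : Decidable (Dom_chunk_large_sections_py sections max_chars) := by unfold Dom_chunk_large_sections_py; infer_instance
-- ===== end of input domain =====

-- B replaces A's paragraph-by-paragraph accumulator loop by a different algorithm: a
-- prefix-sum array of paragraph lengths, each chunk boundary found by binary search on
-- that monotone array, then the slices between consecutive cuts are formatted
-- (objective: alternative algorithm, same overall cost).

-- ===== PORT A =====
-- the body of A's inner 'for para in paragraphs' loop; state = (chunk_parts, chunk_len, chunk_idx, result)
def pvAStep (d : PySem.Dict String String) (mc : Int)
    (st : List String × Int × Int × List (List (String × String))) (para : String) :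
    List String × Int × Int × List (List (String × String)) :=
  if st.2.1 + PySem.Str.len para > mc ∧ st.1 ≠ [] then
    ([para], PySem.Str.len para, st.2.2.1 + 1,
      st.2.2.2 ++ [((d.insert "heading" (d.getD "heading" "" ++ " (part " ++ PySem.Int.toStr (st.2.2.1 + 1) ++ ")")).insert "content" (PySem.Str.join "\n\n" st.1)).items])
  else
    (st.1 ++ [para], st.2.1 + PySem.Str.len para, st.2.2.1, st.2.2.2)

def chunk_large_sections_py (sections : List (List (String × String))) (max_chars : Int) : List (List (String × String)) :=
  sections.foldl (fun result sec =>
    let d := PySem.Dict.mk sec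
    let content := d.getD "content" ""
    if PySem.Str.len content ≤ max_chars then
      result ++ [sec]
    else
      -- content.split("\n\n"): the separator is a nonempty literal, so split? is always some
      let st := ((PySem.Str.split? content "\n\n").getD []).foldl (pvAStep d max_chars) ([], 0, 0, result)
      if st.1 ≠ [] then
        st.2.2.2 ++ [((d.insert "heading" (d.getD "heading" "" ++ (if st.2.2.1 > 0 then " (part " ++ PySem.Int.toStr (st.2.2.1 + 1) ++ ")" else ""))).insert "content" (PySem.Str.join "\n\n" st.1)).items]
      else st.2.2.2)
    []

-- ===== PORT B =====
-- B's prefix list: 'prefix = [0]; for p in paras: prefix.append(prefix[-1] + len(p))'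
def pvPrefixFrom (t : Int) : List String → List Int
  | [] => [t]
  | p :: ps => t :: pvPrefixFrom (t + PySem.Str.len p) ps

-- prefix[j] (always in range in B; 0 is a dead default)
def pvPreGet (pre : List Int) (j : Nat) : Int := (PySem.List.pyGet? pre (j : Int)).getD 0

-- B's inner 'while lo < hi' binary search ('mid = (lo + hi + 1) // 2' written inline);
-- fuel is only a totality guard: any fuel ≥ hi - lo computes the loop's value
def pvBSearch (pre : List Int) (limit : Int) : Nat → Nat → Nat → Nat
  | 0, lo, _ => lo
  | fuel + 1, lo, hi =>
    if lo < hi then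
      if pvPreGet pre ((lo + hi + 1) / 2) ≤ limit then pvBSearch pre limit fuel ((lo + hi + 1) / 2) hi
      else pvBSearch pre limit fuel lo ((lo + hi + 1) / 2 - 1)
    else lo

-- B's outer 'while cuts[-1] < n' loop, returning the cuts after i;
-- fuel is only a totality guard: any fuel ≥ n - i computes the loop's value
def pvCutsFrom (pre : List Int) (mc : Int) (n : Nat) : Nat → Nat → List Nat
  | 0, _ => []
  | fuel + 1, i =>
    if i < n then
      pvBSearch pre (pvPreGet pre i + mc) n (i + 1) n ::
        pvCutsFrom pre mc n fuel (pvBSearch pre (pvPreGet pre i + mc) n (i + 1) n)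
    else []

-- {**section, "heading": heading + suffix, "content": join}
def pvMakeChunk (sec : List (String × String)) (suffix : String) (group : List String) :
    List (String × String) :=
  (((PySem.Dict.mk sec).insert "heading" ((PySem.Dict.mk sec).getD "heading" "" ++ suffix)).insert "content" (PySem.Str.join "\n\n" group)).items

def chunk_large_sections_py_alt (sections : List (List (String × String))) (max_chars : Int) : List (List (String × String)) :=
  sections.foldl (fun result sec =>
    let content := (PySem.Dict.mk sec).getD "content" ""
    if PySem.Str.len content ≤ max_chars then
      result ++ [sec]
    else
      let paras := (PySem.Str.split? content "\n\n").getD []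
      let pre := pvPrefixFrom 0 paras
      let cuts : List Nat := 0 :: pvCutsFrom pre max_chars paras.length paras.length 0
      result ++ (PySem.List.enumerate (cuts.zip cuts.tail)).map (fun p =>
        pvMakeChunk sec (if 2 < cuts.length then " (part " ++ PySem.Int.toStr (p.1 + 1) ++ ")" else "")
          (PySem.List.slice paras (some (p.2.1 : Int)) (some (p.2.2 : Int)))))
    []

-- ===== PRECONDITION & SPEC =====
-- Pre_ excludes exactly the inputs where the Python A raises KeyError: a section without a
-- "content" key, or an oversized section without a "heading" key.
def Pre_chunk_large_sections_py (sections : List (List (String × String))) (max_chars : Int) : Prop :=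
  ∀ sec ∈ sections, (PySem.Dict.mk sec).contains "content" = true ∧
    (max_chars < PySem.Str.len ((PySem.Dict.mk sec).getD "content" "") →
      (PySem.Dict.mk sec).contains "heading" = true)
instance (sections : List (List (String × String))) (max_chars : Int) : Decidable (Pre_chunk_large_sections_py sections max_chars) := by unfold Pre_chunk_large_sections_py; infer_instance

def pvWitness_chunk_large_sections_py : (List (List (String × String))) × Int :=
  ([[("heading", "h"), ("content", "aa\n\nbb")]], 3)

def Spec_chunk_large_sections_py (sections : List (List (String × String))) (max_chars : Int) (out : List (List (String × String))) : Prop := out = chunk_large_sections_py_alt sections max_chars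
instance (sections : List (List (String × String))) (max_chars : Int) (out : List (List (String × String))) : Decidable (Spec_chunk_large_sections_py sections max_chars out) := by unfold Spec_chunk_large_sections_py; infer_instance

-- ===== CLAIM (what is proved, stated in full; the proofs are below) =====
def Claim_equal_chunk_large_sections_py : Prop := ∀ (sections : List (List (String × String))) (max_chars : Int), Dom_chunk_large_sections_py sections max_chars → Pre_chunk_large_sections_py sections max_chars → Spec_chunk_large_sections_py sections max_chars (chunk_large_sections_py sections max_chars)

-- ===== LEMMAS AND PROOFS =====

-- proof-side greedy grouping that both ports are reduced to; state = (groups, cur, total)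
def pvBStep (mc : Int) (st : List (List String) × List String × Int) (para : String) :
    List (List String) × List String × Int :=
  if st.2.1 ≠ [] ∧ st.2.2 + PySem.Str.len para > mc then
    (st.1 ++ [st.2.1], [para], PySem.Str.len para)
  else
    (st.1, st.2.1 ++ [para], st.2.2 + PySem.Str.len para)

-- number of further paragraphs the current chunk still takes
def pvFit (mc acc : Int) : List String → Nat
  | [] => 0
  | p :: ps => if mc < acc + PySem.Str.len p then 0 else pvFit mc (acc + PySem.Str.len p) ps + 1

-- the greedy paragraph groups, as a structural recursion
def pvGroups (mc : Int) : List String → List (List String)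
  | [] => []
  | p :: ps =>
    (p :: ps.take (pvFit mc (PySem.Str.len p) ps)) ::
      pvGroups mc (ps.drop (pvFit mc (PySem.Str.len p) ps))
termination_by l => l.length
decreasing_by simp

-- splitOn.go never returns the empty list
theorem pv_go_ne (sep : List Char) : ∀ fuel l cur acc, PySem.Chars.splitOn.go sep fuel l cur acc ≠ [] := by
  intro fuel
  induction fuel with
  | zero => intro l cur acc; rw [PySem.Chars.splitOn.go.eq_def]; simp
  | succ n ih =>
    intro l cur acc
    rw [PySem.Chars.splitOn.go.eq_def]
    match l with
    | [] => simp
    | c :: rest =>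
      simp only []
      split
      · exact ih _ _ _
      · exact ih _ _ _

-- s.split("\n\n") is never empty
theorem pv_split_ne (s : String) : (PySem.Str.split? s "\n\n").getD [] ≠ [] := by
  simp [PySem.Str.split?, PySem.Chars.split?, PySem.Chars.splitOn]
  exact pv_go_ne _ _ _ _ _

-- the groups already flushed pass through the grouping fold unchanged
theorem pv_bfold_prefix (mc : Int) : ∀ (paras : List String) (g : List (List String)) (c : List String) (t : Int),
    paras.foldl (pvBStep mc) (g, c, t) =
      (g ++ (paras.foldl (pvBStep mc) ([], c, t)).1, (paras.foldl (pvBStep mc) ([], c, t)).2) := by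
  intro paras
  induction paras with
  | nil => intro g c t; simp
  | cons p ps ih =>
    intro g c t
    simp only [List.foldl_cons, pvBStep]
    by_cases h : c ≠ [] ∧ t + PySem.Str.len p > mc
    · rw [if_pos h, if_pos h]
      rw [ih (g ++ [c]) [p] (PySem.Str.len p), ih ([] ++ [c]) [p] (PySem.Str.len p)]
      simp
    · rw [if_neg h, if_neg h]
      exact ih g (c ++ [p]) (t + PySem.Str.len p)

-- enumerate at a shifted start
theorem pv_enum_shift {α : Type} (xs : List α) : ∀ (s : Int),
    PySem.List.enumerate xs (s + 1) = (PySem.List.enumerate xs s).map (fun p => (p.1 + 1, p.2)) := by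
  induction xs with
  | nil => intro s; simp [PySem.List.enumerate_nil]
  | cons x t ih => intro s; simp [PySem.List.enumerate_cons, ih]

-- enumerate commutes with mapping the elements
theorem pv_enum_map {α β : Type} (f : α → β) : ∀ (xs : List α) (s : Int),
    PySem.List.enumerate (xs.map f) s = (PySem.List.enumerate xs s).map (fun p => (p.1, f p.2)) := by
  intro xs
  induction xs with
  | nil => intro s; simp [PySem.List.enumerate_nil]
  | cons x t ih => intro s; simp [PySem.List.enumerate_cons, ih]

-- A's interleaved loop, started mid-way, equals the grouping fold followed by formatting the flushed groups
theorem pv_inner (d : PySem.Dict String String) (mc : Int) :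
    ∀ (paras : List String) (cur : List String) (total idx : Int) (res : List (List (String × String))),
    paras.foldl (pvAStep d mc) (cur, total, idx, res) =
      ((paras.foldl (pvBStep mc) ([], cur, total)).2.1,
       (paras.foldl (pvBStep mc) ([], cur, total)).2.2,
       idx + ((paras.foldl (pvBStep mc) ([], cur, total)).1.length : Int),
       res ++ (PySem.List.enumerate (paras.foldl (pvBStep mc) ([], cur, total)).1 (idx + 1)).map
         (fun p => ((d.insert "heading" (d.getD "heading" "" ++ " (part " ++ PySem.Int.toStr p.1 ++ ")")).insert "content" (PySem.Str.join "\n\n" p.2)).items)) := by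
  intro paras
  induction paras with
  | nil =>
    intro cur total idx res
    simp [PySem.List.enumerate_nil]
  | cons p ps ih =>
    intro cur total idx res
    simp only [List.foldl_cons]
    by_cases h : cur ≠ [] ∧ total + PySem.Str.len p > mc
    · rw [show pvAStep d mc (cur, total, idx, res) p =
        ([p], PySem.Str.len p, idx + 1,
          res ++ [((d.insert "heading" (d.getD "heading" "" ++ " (part " ++ PySem.Int.toStr (idx + 1) ++ ")")).insert "content" (PySem.Str.join "\n\n" cur)).items]) from by
          simp only [pvAStep]; rw [if_pos ⟨h.2, h.1⟩]]
      rw [show pvBStep mc ([], cur, total) p = ([] ++ [cur], [p], PySem.Str.len p) from by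
          simp only [pvBStep]; rw [if_pos h]]
      rw [ih [p] (PySem.Str.len p) (idx + 1)]
      rw [pv_bfold_prefix mc ps ([] ++ [cur]) [p] (PySem.Str.len p)]
      simp only [List.nil_append, PySem.List.enumerate_cons, List.map_cons,
        List.length_cons, List.append_assoc, List.cons_append]
      push_cast
      ring_nf
    · rw [show pvAStep d mc (cur, total, idx, res) p =
        (cur ++ [p], total + PySem.Str.len p, idx, res) from by
          simp only [pvAStep]
          rw [if_neg (by tauto)]]
      rw [show pvBStep mc ([], cur, total) p = ([], cur ++ [p], total + PySem.Str.len p) from by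
          simp only [pvBStep]; rw [if_neg h]]
      exact ih (cur ++ [p]) (total + PySem.Str.len p) idx res

-- sum of paragraph lengths
def pvSL (xs : List String) : Int := (xs.map PySem.Str.len).sum

-- what the grouping fold computes, and the uniform chunk formatting both sides reduce to
def pvGroupsOf (mc : Int) (paras : List String) : List (List String) :=
  (paras.foldl (pvBStep mc) ([], [], 0)).1 ++ [(paras.foldl (pvBStep mc) ([], [], 0)).2.1]

def pvFormat (sec : List (String × String)) (res : List (List (String × String)))
    (groups : List (List String)) : List (List (String × String)) :=
  res ++ (PySem.List.enumerate groups).map (fun p =>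
    pvMakeChunk sec (if 1 < groups.length then " (part " ++ PySem.Int.toStr (p.1 + 1) ++ ")" else "") p.2)

theorem pvGroups_nil (mc : Int) : pvGroups mc [] = [] := by rw [pvGroups]

theorem pvGroups_cons (mc : Int) (p : String) (ps : List String) :
    pvGroups mc (p :: ps) =
      (p :: ps.take (pvFit mc (PySem.Str.len p) ps)) ::
        pvGroups mc (ps.drop (pvFit mc (PySem.Str.len p) ps)) := by
  rw [pvGroups]

-- after the grouping fold over a nonempty paragraph list the current group is nonempty
theorem pv_bfold_cur_ne (mc : Int) : ∀ (paras : List String) (g : List (List String)) (c : List String) (t : Int),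
    paras ≠ [] → (paras.foldl (pvBStep mc) (g, c, t)).2.1 ≠ [] := by
  intro paras
  induction paras with
  | nil => intro g c t h; exact absurd rfl h
  | cons p ps ih =>
    intro g c t _
    rcases ps with _ | ⟨q, qs⟩
    · simp only [List.foldl_cons, List.foldl_nil, pvBStep]
      split <;> simp
    · exact ih _ _ _ (by simp)

-- the grouping fold computes the recursive greedy groups
theorem pv_bfold_groups (mc : Int) : ∀ (paras : List String) (cur : List String) (total : Int),
    cur ≠ [] →
    (paras.foldl (pvBStep mc) ([], cur, total)).1 ++ [(paras.foldl (pvBStep mc) ([], cur, total)).2.1] =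
      (cur ++ paras.take (pvFit mc total paras)) :: pvGroups mc (paras.drop (pvFit mc total paras)) := by
  intro paras
  induction paras with
  | nil => intro cur total _; simp [pvFit, pvGroups]
  | cons p ps ih =>
    intro cur total hcur
    simp only [List.foldl_cons]
    by_cases h : mc < total + PySem.Str.len p
    · rw [show pvBStep mc ([], cur, total) p = ([] ++ [cur], [p], PySem.Str.len p) from by
        simp only [pvBStep]; rw [if_pos ⟨hcur, h⟩]]
      rw [pv_bfold_prefix mc ps ([] ++ [cur]) [p] (PySem.Str.len p)]
      simp only [List.nil_append, List.cons_append]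
      rw [ih [p] (PySem.Str.len p) (by simp)]
      rw [show pvFit mc total (p :: ps) = 0 from by simp only [pvFit]; rw [if_pos h]]
      simp only [List.take_zero, List.drop_zero, List.append_nil]
      rw [show pvGroups mc (p :: ps) =
        (p :: ps.take (pvFit mc (PySem.Str.len p) ps)) ::
          pvGroups mc (ps.drop (pvFit mc (PySem.Str.len p) ps)) from by rw [pvGroups]]
      simp
    · rw [show pvBStep mc ([], cur, total) p = ([], cur ++ [p], total + PySem.Str.len p) from by
        simp only [pvBStep]; rw [if_neg (by tauto)]]
      rw [ih (cur ++ [p]) (total + PySem.Str.len p) (by simp)]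
      rw [show pvFit mc total (p :: ps) = pvFit mc (total + PySem.Str.len p) ps + 1 from by
        simp only [pvFit]; rw [if_neg h]]
      rw [List.take_succ_cons, List.drop_succ_cons]
      simp

-- the grouping fold over the whole paragraph list yields the recursive greedy groups
theorem pv_groupsOf_eq (mc : Int) (paras : List String) (h : paras ≠ []) :
    pvGroupsOf mc paras = pvGroups mc paras := by
  obtain ⟨p, ps, rfl⟩ := List.exists_cons_of_ne_nil h
  unfold pvGroupsOf
  simp only [List.foldl_cons]
  rw [show pvBStep mc ([], [], 0) p = ([], [] ++ [p], 0 + PySem.Str.len p) from by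
    simp only [pvBStep]; rw [if_neg (by simp)]]
  simp only [List.nil_append, Int.zero_add]
  rw [pv_bfold_groups mc ps [p] (PySem.Str.len p) (by simp)]
  rw [show pvGroups mc (p :: ps) =
    (p :: ps.take (pvFit mc (PySem.Str.len p) ps)) ::
      pvGroups mc (ps.drop (pvFit mc (PySem.Str.len p) ps)) from by rw [pvGroups]]
  simp

-- pvFit takes at most the whole list
theorem pv_fit_le (mc : Int) : ∀ (ps : List String) (acc : Int), pvFit mc acc ps ≤ ps.length := by
  intro ps
  induction ps with
  | nil => intro acc; simp [pvFit]
  | cons p t ih =>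
    intro acc
    simp only [pvFit]
    split
    · simp
    · have := ih (acc + PySem.Str.len p); rw [List.length_cons]; omega

-- what pvFit takes fits
theorem pv_fit_fits (mc : Int) : ∀ (ps : List String) (acc : Int),
    pvFit mc acc ps = 0 ∨ acc + pvSL (ps.take (pvFit mc acc ps)) ≤ mc := by
  intro ps
  induction ps with
  | nil => intro acc; left; rfl
  | cons p t ih =>
    intro acc
    simp only [pvFit]
    by_cases h : mc < acc + PySem.Str.len p
    · rw [if_pos h]; left; rfl
    · rw [if_neg h]
      right
      rw [List.take_succ_cons]
      unfold pvSL
      rw [List.map_cons, List.sum_cons]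
      rcases ih (acc + PySem.Str.len p) with h0 | hle
      · rw [h0]
        simp only [List.take_zero, List.map_nil, List.sum_nil, Int.add_zero]
        omega
      · unfold pvSL at hle
        linarith

-- one more paragraph than pvFit takes does not fit
theorem pv_fit_maximal (mc : Int) : ∀ (ps : List String) (acc : Int),
    pvFit mc acc ps < ps.length → mc < acc + pvSL (ps.take (pvFit mc acc ps + 1)) := by
  intro ps
  induction ps with
  | nil => intro acc h; simp at h
  | cons p t ih =>
    intro acc h
    simp only [pvFit] at h ⊢
    by_cases hc : mc < acc + PySem.Str.len p
    · rw [if_pos hc] at h ⊢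
      simpa [pvSL] using hc
    · rw [if_neg hc] at h ⊢
      rw [List.take_succ_cons]
      unfold pvSL
      rw [List.map_cons, List.sum_cons]
      have := ih (acc + PySem.Str.len p) (by rw [List.length_cons] at h; omega)
      unfold pvSL at this
      linarith

theorem pv_SL_nonneg (xs : List String) : 0 ≤ pvSL xs := by
  apply List.sum_nonneg
  intro x hx
  simp at hx
  obtain ⟨s, _, rfl⟩ := hx
  simp

theorem pv_SL_take_mono (xs : List String) (a b : Nat) (h : a ≤ b) :
    pvSL (xs.take a) ≤ pvSL (xs.take b) := by
  have hb : b = a + (b - a) := by omega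
  rw [hb, List.take_add]
  unfold pvSL
  rw [List.map_append, List.sum_append]
  have := pv_SL_nonneg (((xs.drop a).take (b - a)))
  unfold pvSL at this
  linarith

-- the prefix array holds the paragraph-length prefix sums
theorem pv_pre_get (paras : List String) : ∀ (t : Int) (j : Nat), j ≤ paras.length →
    pvPreGet (pvPrefixFrom t paras) j = t + pvSL (paras.take j) := by
  induction paras with
  | nil =>
    intro t j hj
    have hj0 : j = 0 := by simpa using hj
    subst hj0
    simp [pvPreGet, pvPrefixFrom, pvSL]
  | cons p ps ih =>
    intro t j hj
    cases j with
    | zero => simp [pvPreGet, pvPrefixFrom, pvSL]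
    | succ k =>
      simp only [pvPrefixFrom, List.take_succ_cons]
      have hk : k ≤ ps.length := by simpa using hj
      have := ih (t + PySem.Str.len p) k hk
      unfold pvPreGet at this ⊢
      rw [PySem.List.pyGet?_natCast] at this ⊢
      simp only [List.getElem?_cons_succ]
      rw [this]
      unfold pvSL
      rw [List.map_cons, List.sum_cons]
      ring

-- the binary search returns the unique index with the bracketing properties below
theorem pv_bsearch_eq (pre : List Int) (limit : Int) :
    ∀ (d lo hi F : Nat), hi - lo ≤ d → lo ≤ F → F ≤ hi →
    (∀ j k : Nat, lo ≤ j → j ≤ k → k ≤ hi → pvPreGet pre j ≤ pvPreGet pre k) →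
    (lo < F → pvPreGet pre F ≤ limit) →
    (∀ j : Nat, F < j → j ≤ hi → limit < pvPreGet pre j) →
    pvBSearch pre limit d lo hi = F := by
  intro d
  induction d with
  | zero =>
    intro lo hi F hd h1 h2 _ _ _
    simp only [pvBSearch]
    omega
  | succ n ih =>
    intro lo hi F hd h1 h2 hmono hP hQ
    simp only [pvBSearch]
    by_cases hlt : lo < hi
    · rw [if_pos hlt]
      by_cases hc : pvPreGet pre ((lo + hi + 1) / 2) ≤ limit
      · rw [if_pos hc]
        have hmF : (lo + hi + 1) / 2 ≤ F := by
          by_contra hcon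
          exact absurd hc (not_le.mpr (hQ _ (by omega) (by omega)))
        exact ih _ hi F (by omega) hmF h2
          (fun j k hj hjk hk => hmono j k (by omega) hjk hk)
          (fun _ => hP (by omega)) hQ
      · rw [if_neg hc]
        have hFm : F < (lo + hi + 1) / 2 := by
          by_contra hcon
          rw [not_lt] at hcon
          exact hc (le_trans (hmono _ F (by omega) hcon (by omega)) (hP (by omega)))
        exact ih lo _ F (by omega) h1 (by omega)
          (fun j k hj hjk hk => hmono j k hj hjk (by omega)) hP
          (fun j hj hk => hQ j hj (by omega))
    · rw [if_neg hlt]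
      omega

-- the binary search from cut i lands exactly where the greedy rule cuts
theorem pv_bsearch_fit (mc : Int) (paras : List String) (i : Nat) (hi : i < paras.length)
    (fuel : Nat) (hfuel : paras.length - (i + 1) ≤ fuel) :
    pvBSearch (pvPrefixFrom 0 paras) (pvPreGet (pvPrefixFrom 0 paras) i + mc) fuel (i + 1) paras.length
      = i + 1 + pvFit mc (PySem.Str.len paras[i]) (paras.drop (i + 1)) := by
  have hdrop : paras.drop i = paras[i] :: paras.drop (i + 1) := List.drop_eq_getElem_cons hi
  set p := paras[i] with hp
  set rest := paras.drop (i + 1) with hrest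
  set f := pvFit mc (PySem.Str.len p) rest with hf
  have hrl : rest.length = paras.length - (i + 1) := by rw [hrest, List.length_drop]
  have hfle : f ≤ rest.length := pv_fit_le mc rest (PySem.Str.len p)
  have hdecomp : ∀ k : Nat, pvSL (paras.take (i + 1 + k)) =
      pvSL (paras.take i) + PySem.Str.len p + pvSL (rest.take k) := by
    intro k
    rw [show i + 1 + k = i + (1 + k) from by omega, List.take_add, hdrop,
      show 1 + k = k + 1 from by omega, List.take_succ_cons]
    unfold pvSL
    rw [List.map_append, List.sum_append, List.map_cons, List.sum_cons]
    ring
  apply pv_bsearch_eq (pvPrefixFrom 0 paras) (pvPreGet (pvPrefixFrom 0 paras) i + mc)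
    fuel (i + 1) paras.length (i + 1 + f) (by omega) (by omega) (by omega)
  · intro j k hj hjk hk
    rw [pv_pre_get paras 0 j (by omega), pv_pre_get paras 0 k (by omega)]
    have := pv_SL_take_mono paras j k hjk
    linarith
  · intro hlo
    rw [pv_pre_get paras 0 (i + 1 + f) (by omega), pv_pre_get paras 0 i (by omega)]
    rw [hdecomp f]
    rcases pv_fit_fits mc rest (PySem.Str.len p) with h0 | hle
    · omega
    · linarith
  · intro j hj hk
    rw [pv_pre_get paras 0 j (by omega), pv_pre_get paras 0 i (by omega)]
    rw [show j = i + 1 + (j - (i + 1)) from by omega, hdecomp (j - (i + 1))]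
    have hmax := pv_fit_maximal mc rest (PySem.Str.len p) (by omega)
    have hmono := pv_SL_take_mono rest (f + 1) (j - (i + 1)) (by omega)
    linarith

-- the slices between consecutive cuts are the recursive greedy groups
theorem pv_cuts_groups (mc : Int) (paras : List String) :
    ∀ (d i : Nat), paras.length - i ≤ d →
    ((i :: pvCutsFrom (pvPrefixFrom 0 paras) mc paras.length d i).zip
        (pvCutsFrom (pvPrefixFrom 0 paras) mc paras.length d i)).map
      (fun ab => PySem.List.slice paras (some (ab.1 : Int)) (some (ab.2 : Int)))
    = pvGroups mc (paras.drop i) := by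
  intro d
  induction d with
  | zero =>
    intro i hd
    simp only [pvCutsFrom]
    rw [List.drop_eq_nil_of_le (by omega), pvGroups_nil]
    simp
  | succ d' ih =>
    intro i hd
    by_cases hin : i < paras.length
    · have hdrop : paras.drop i = paras[i] :: paras.drop (i + 1) := List.drop_eq_getElem_cons hin
      set p := paras[i] with hp
      set rest := paras.drop (i + 1) with hrest
      set f := pvFit mc (PySem.Str.len p) rest with hf
      have hcut : pvCutsFrom (pvPrefixFrom 0 paras) mc paras.length (d' + 1) i
          = (i + 1 + f) :: pvCutsFrom (pvPrefixFrom 0 paras) mc paras.length d' (i + 1 + f) := by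
        simp only [pvCutsFrom, if_pos hin,
          pv_bsearch_fit mc paras i hin paras.length (by omega)]
        rfl
      rw [hcut, List.zip_cons_cons, List.map_cons, ih (i + 1 + f) (by omega)]
      rw [hdrop, pvGroups_cons]
      rw [show (paras.drop (i + 1 + f)) = rest.drop f from by rw [hrest, List.drop_drop]]
      congr 1
      rw [PySem.List.slice_natCast]
      rw [show (i + 1 + f) - i = f + 1 from by omega]
      rw [hdrop, List.take_succ_cons]
    · simp only [pvCutsFrom, if_neg hin]
      rw [List.drop_eq_nil_of_le (by omega), pvGroups_nil]
      simp

-- A's per-section else-branch is the uniform formatting of the grouping fold's groups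
theorem pv_A_else (mc : Int) (res : List (List (String × String))) (sec : List (String × String)) :
    (let d := PySem.Dict.mk sec
     let st := ((PySem.Str.split? (d.getD "content" "") "\n\n").getD []).foldl (pvAStep d mc) ([], 0, 0, res)
     if st.1 ≠ [] then
       st.2.2.2 ++ [((d.insert "heading" (d.getD "heading" "" ++ (if st.2.2.1 > 0 then " (part " ++ PySem.Int.toStr (st.2.2.1 + 1) ++ ")" else ""))).insert "content" (PySem.Str.join "\n\n" st.1)).items]
     else st.2.2.2)
    = pvFormat sec res (pvGroupsOf mc ((PySem.Str.split? ((PySem.Dict.mk sec).getD "content" "") "\n\n").getD [])) := by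
  dsimp only []
  rw [pv_inner]
  set paras := ((PySem.Str.split? ((PySem.Dict.mk sec).getD "content" "") "\n\n").getD []) with hpar
  have hpne : paras ≠ [] := pv_split_ne _
  have hcur : (paras.foldl (pvBStep mc) ([], [], 0)).2.1 ≠ [] :=
    pv_bfold_cur_ne mc paras [] [] 0 hpne
  rw [if_pos hcur]
  unfold pvFormat pvGroupsOf pvMakeChunk
  generalize hB : paras.foldl (pvBStep mc) ([], [], 0) = B at hcur ⊢
  obtain ⟨g, c, t⟩ := B
  dsimp only [] at hcur ⊢
  rcases g with _ | ⟨q, qs⟩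
  · simp [PySem.List.enumerate_cons, PySem.List.enumerate_nil]
  · rw [PySem.List.enumerate_append]
    simp [pv_enum_shift, String.append_assoc,
          PySem.List.enumerate_cons, PySem.List.enumerate_nil]
    rw [show (2 : Int) = 1 + 1 from by norm_num, pv_enum_shift, List.map_map]
    simp

-- B's per-section else-branch is the uniform formatting of the recursive greedy groups
theorem pv_B_else (mc : Int) (res : List (List (String × String))) (sec : List (String × String)) :
    (let paras := (PySem.Str.split? ((PySem.Dict.mk sec).getD "content" "") "\n\n").getD []
     let pre := pvPrefixFrom 0 paras
     let cuts : List Nat := 0 :: pvCutsFrom pre mc paras.length paras.length 0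
     res ++ (PySem.List.enumerate (cuts.zip cuts.tail)).map (fun p =>
       pvMakeChunk sec (if 2 < cuts.length then " (part " ++ PySem.Int.toStr (p.1 + 1) ++ ")" else "")
         (PySem.List.slice paras (some (p.2.1 : Int)) (some (p.2.2 : Int)))))
    = pvFormat sec res (pvGroups mc ((PySem.Str.split? ((PySem.Dict.mk sec).getD "content" "") "\n\n").getD [])) := by
  dsimp only []
  generalize ((PySem.Str.split? ((PySem.Dict.mk sec).getD "content" "") "\n\n").getD []) = paras
  set c := pvCutsFrom (pvPrefixFrom 0 paras) mc paras.length paras.length 0 with hc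
  have h0 := pv_cuts_groups mc paras paras.length 0 (by omega)
  rw [List.drop_zero] at h0
  rw [← hc] at h0
  unfold pvFormat
  rw [← h0, pv_enum_map, List.map_map]
  rw [List.length_map, List.length_zip, List.tail_cons]
  congr 1
  apply List.map_congr_left
  intro p _
  simp only [Function.comp]
  congr 1
  exact if_congr (by rw [List.length_cons]; omega) rfl rfl

-- the two per-section bodies agree
theorem pv_step_eq (mc : Int) (res : List (List (String × String))) (sec : List (String × String)) :
    (let d := PySem.Dict.mk sec
     let content := d.getD "content" ""
     if PySem.Str.len content ≤ mc then
       res ++ [sec]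
     else
       let st := ((PySem.Str.split? content "\n\n").getD []).foldl (pvAStep d mc) ([], 0, 0, res)
       if st.1 ≠ [] then
         st.2.2.2 ++ [((d.insert "heading" (d.getD "heading" "" ++ (if st.2.2.1 > 0 then " (part " ++ PySem.Int.toStr (st.2.2.1 + 1) ++ ")" else ""))).insert "content" (PySem.Str.join "\n\n" st.1)).items]
       else st.2.2.2) =
    (let content := (PySem.Dict.mk sec).getD "content" ""
     if PySem.Str.len content ≤ mc then
       res ++ [sec]
     else
       let paras := (PySem.Str.split? content "\n\n").getD []
       let pre := pvPrefixFrom 0 paras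
       let cuts : List Nat := 0 :: pvCutsFrom pre mc paras.length paras.length 0
       res ++ (PySem.List.enumerate (cuts.zip cuts.tail)).map (fun p =>
         pvMakeChunk sec (if 2 < cuts.length then " (part " ++ PySem.Int.toStr (p.1 + 1) ++ ")" else "")
           (PySem.List.slice paras (some (p.2.1 : Int)) (some (p.2.2 : Int))))) := by
  dsimp only []
  by_cases hl : PySem.Str.len ((PySem.Dict.mk sec).getD "content" "") ≤ mc
  · rw [if_pos hl, if_pos hl]
  · rw [if_neg hl, if_neg hl]
    have hA := pv_A_else mc res sec
    have hB := pv_B_else mc res sec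
    dsimp only [] at hA hB
    rw [hA, hB]
    rw [pv_groupsOf_eq mc _ (pv_split_ne _)]

-- ===== VERDICT (by name: the statement is the Claim_ definition above) =====
theorem chunk_large_sections_py_spec : Claim_equal_chunk_large_sections_py := by
  intro sections max_chars _ _
  unfold Spec_chunk_large_sections_py chunk_large_sections_py chunk_large_sections_py_alt
  congr 1
  funext res sec
  exact pv_step_eq max_chars res sec
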